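-- pv_equiv track=rewrite | github.com/Krista/wikiToLatex | wikiprojekt/parser.py | convertEnumerate
-- ===== SOURCE A (Python) =====
-- def convertEnumerate(text):
--     lines = text.split("\n")
--     for i in range(len(lines)):
--         if lines[i].startswith("#"):
--             lines[i] = "\n\\begin{enumerate} \n \item {" + lines[i][1:].strip() + "}"
--             i += 1
--             while i < len(lines) and lines[i].startswith("#"):
--                 lines[i] = "\n\item {" + lines[i][1:].strip() + "}"
--                 i += 1
--             lines[i-1] += " \n\\end{enumerate}\n"
--     #treba najst prvy vyskyt a potom while kym to plati
--     return '\n'.join(lines)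
-- ===== SOURCE B (Python) =====
-- def convertEnumerate(text):
--     out = []
--     in_enumerate = False
--     for line in text.split("\n"):
--         if line.startswith("#"):
--             body = line[1:].strip()
--             if in_enumerate:
--                 out.append("\n\\item {" + body + "}")
--             else:
--                 out.append("\n\\begin{enumerate} \n \\item {" + body + "}")
--                 in_enumerate = True
--         else:
--             if in_enumerate:
--                 out[-1] += " \n\\end{enumerate}\n"
--                 in_enumerate = False
--             out.append(line)
--     if in_enumerate:
--         out[-1] += " \n\\end{enumerate}\n"
--     return '\n'.join(out)
-- ===== Notes on version B (the rewrite author's own statement) =====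
-- stated objective: simpler
-- what changed: Replaced A's nested index-jumping while-loop inside a for with in-place list mutation and a look-back edit of lines[i-1] by a single flat pass over the lines keeping a boolean in_enumerate state and building a fresh output list.
import Mathlib
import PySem

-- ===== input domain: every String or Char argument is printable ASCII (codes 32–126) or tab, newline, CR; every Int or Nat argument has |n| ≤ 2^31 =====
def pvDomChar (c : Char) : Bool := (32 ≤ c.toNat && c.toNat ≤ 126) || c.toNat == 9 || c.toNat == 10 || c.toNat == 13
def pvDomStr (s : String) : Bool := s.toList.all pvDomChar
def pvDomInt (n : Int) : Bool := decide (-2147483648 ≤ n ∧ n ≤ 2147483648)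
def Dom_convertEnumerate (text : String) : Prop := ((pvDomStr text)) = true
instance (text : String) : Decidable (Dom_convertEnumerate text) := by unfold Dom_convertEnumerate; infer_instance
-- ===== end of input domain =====

-- B replaces A's nested index-jumping while inside a for with a single flat pass keeping a boolean
-- `in_enumerate` state (objective: simpler); same return value, no side effects.

-- shared string constants / per-line transforms (identical literals in both Python versions)
def pvEndStr : List Char := " \n\\end{enumerate}\n".toList
def pvFirst (l : List Char) : List Char :=
  "\n\\begin{enumerate} \n \\item {".toList ++ PySem.Chars.strip (PySem.Chars.slice l (some 1) none) ++ ['}']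
def pvItem (l : List Char) : List Char :=
  "\n\\item {".toList ++ PySem.Chars.strip (PySem.Chars.slice l (some 1) none) ++ ['}']

-- ===== PORT A =====
-- the inner `while i < len(lines) and lines[i].startswith("#")`
def paWhile (L : List (List Char)) (i : Nat) : List (List Char) × Nat :=
  if h : i < L.length ∧ PySem.Chars.startswith (L.getD i []) ['#'] then
    paWhile (L.set i (pvItem (L.getD i []))) (i + 1)
  else (L, i)
termination_by L.length - i
decreasing_by simp; omega

-- the outer `for i in range(len(lines))` (the `i += 1` inside the body does not survive
-- to the next for-iteration in Python; n is the fixed original length, preserved by set)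
def paFor (L : List (List Char)) (i n : Nat) : List (List Char) :=
  if _h : i < n then
    let L' :=
      if PySem.Chars.startswith (L.getD i []) ['#'] then
        let L1 := L.set i (pvFirst (L.getD i []))
        let r := paWhile L1 (i + 1)
        r.1.set (r.2 - 1) (r.1.getD (r.2 - 1) [] ++ pvEndStr)
      else L
    paFor L' (i + 1) n
  else L
termination_by n - i

def convertEnumerate (text : String) : String :=
  String.ofList (PySem.Chars.join ['\n']
    (paFor (PySem.Chars.splitOn text.toList ['\n']) 0 (PySem.Chars.splitOn text.toList ['\n']).length))

-- ===== PORT B =====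
-- `out[-1] += " \n\end{enumerate}\n"`; out is kept reversed (append = cons), so this edits the head
def pbClose (acc : List (List Char)) : List (List Char) :=
  match acc with
  | [] => []
  | h :: t => (h ++ pvEndStr) :: t

def pbLoop (ls : List (List Char)) (inEnum : Bool) (acc : List (List Char)) : List (List Char) :=
  match ls with
  | [] => if inEnum then pbClose acc else acc
  | l :: rest =>
    if PySem.Chars.startswith l ['#'] then
      if inEnum then pbLoop rest true (pvItem l :: acc)
      else pbLoop rest true (pvFirst l :: acc)
    else
      pbLoop rest false (l :: (if inEnum then pbClose acc else acc))

def convertEnumerate_alt (text : String) : String :=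
  String.ofList (PySem.Chars.join ['\n'] ((pbLoop (PySem.Chars.splitOn text.toList ['\n']) false []).reverse))

-- ===== PRECONDITION & SPEC =====
def Spec_convertEnumerate (text : String) (out : String) : Prop := out = convertEnumerate_alt text
instance (text : String) (out : String) : Decidable (Spec_convertEnumerate text out) := by unfold Spec_convertEnumerate; infer_instance

-- ===== CLAIM (what is proved, stated in full; the proofs are below) =====
def Claim_equal_convertEnumerate : Prop := ∀ (text : String), Dom_convertEnumerate text → Spec_convertEnumerate text (convertEnumerate text)

-- ===== LEMMAS AND PROOFS =====

-- abbreviation for '#'-line test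
def pvIsH (l : List Char) : Bool := PySem.Chars.startswith l ['#']

-- common specification: the state machine written as mutual functions on the line list
mutual
def pvM (h : List Char) (xs : List (List Char)) : List (List Char) :=
  match xs with
  | [] => [h ++ pvEndStr]
  | x :: rest =>
    if pvIsH x then h :: pvM (pvItem x) rest
    else (h ++ pvEndStr) :: x :: pvG rest

def pvG (xs : List (List Char)) : List (List Char) :=
  match xs with
  | [] => []
  | x :: rest =>
    if pvIsH x then pvM (pvFirst x) rest
    else x :: pvG rest
end

-- close the last element of a (nonempty) block
def pvCloseLast : List (List Char) → List (List Char)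
  | [] => []
  | [y] => [y ++ pvEndStr]
  | y :: y2 :: ys => y :: pvCloseLast (y2 :: ys)

theorem pvItem_head (l : List Char) : pvIsH (pvItem l) = false := by
  simp [pvItem, pvIsH, PySem.Chars.startswith, List.isPrefixOf]

theorem pvFirst_head (l : List Char) : pvIsH (pvFirst l) = false := by
  simp [pvFirst, pvIsH, PySem.Chars.startswith, List.isPrefixOf]

theorem pvIsH_append_end (y : List Char) (hy : pvIsH y = false) :
    pvIsH (y ++ pvEndStr) = false := by
  cases y with
  | nil => simp [pvIsH, pvEndStr, PySem.Chars.startswith, List.isPrefixOf]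
  | cons c cs =>
    simp [pvIsH, PySem.Chars.startswith, List.isPrefixOf] at hy ⊢
    exact hy

theorem pvCloseLast_heads (ys : List (List Char)) (h : ∀ y ∈ ys, pvIsH y = false) :
    ∀ y ∈ pvCloseLast ys, pvIsH y = false := by
  induction ys with
  | nil => simp [pvCloseLast]
  | cons y t ih =>
    cases t with
    | nil =>
      intro z hz
      simp [pvCloseLast] at hz
      rw [hz]
      exact pvIsH_append_end y (h y (by simp))
    | cons y2 t2 =>
      intro z hz
      simp only [pvCloseLast, List.mem_cons] at hz
      rcases hz with hz | hz
      · rw [hz]; exact h y (by simp)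
      · exact ih (fun w hw => h w (by simp [hw])) z hz

theorem pvCloseLast_length (ys : List (List Char)) : (pvCloseLast ys).length = ys.length := by
  induction ys with
  | nil => simp [pvCloseLast]
  | cons y t ih =>
    cases t with
    | nil => simp [pvCloseLast]
    | cons y2 t2 => simp [pvCloseLast] at ih ⊢; omega

theorem pvCloseLast_append (P bs : List (List Char)) (hb : bs ≠ []) :
    pvCloseLast (P ++ bs) = P ++ pvCloseLast bs := by
  induction P with
  | nil => simp
  | cons p P ih =>
    have hne : P ++ bs ≠ [] := by simp [hb]
    obtain ⟨z, zs, hz⟩ := List.exists_cons_of_ne_nil hne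
    rw [List.cons_append, hz,
      show pvCloseLast (p :: z :: zs) = p :: pvCloseLast (z :: zs) from rfl, ← hz, ih]
    simp

-- closing the LAST element of the block, as A's look-back set does it
theorem pvSetLast (ys : List (List Char)) : ∀ (Q : List (List Char)), ys ≠ [] →
    (ys ++ Q).set (ys.length - 1) ((ys ++ Q).getD (ys.length - 1) [] ++ pvEndStr)
      = pvCloseLast ys ++ Q := by
  induction ys with
  | nil => intro Q h; exact absurd rfl h
  | cons y t ih =>
    intro Q _
    cases t with
    | nil => simp [pvCloseLast, List.getD]
    | cons y2 t2 =>
      have hrec := ih (Q := Q) (by simp)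
      simp only [List.length_cons, Nat.add_sub_cancel] at hrec ⊢
      rw [show pvCloseLast (y :: y2 :: t2) = y :: pvCloseLast (y2 :: t2) from rfl]
      rw [List.cons_append, List.set_cons_succ]
      rw [show ((y :: (y2 :: t2 ++ Q)).getD (t2.length + 1) [])
            = ((y2 :: t2 ++ Q).getD t2.length []) from by simp [List.getD]]
      rw [List.cons_append]
      exact congrArg (y :: ·) hrec

-- the run rewritten by pvM equals close-last of the item block followed by pvG of the tail
theorem pvM_run (xs : List (List Char)) : ∀ h, pvM h xs =
    pvCloseLast (h :: (xs.takeWhile pvIsH).map pvItem) ++ pvG (xs.dropWhile pvIsH) := by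
  induction xs with
  | nil => intro h; simp [pvM, pvG, pvCloseLast]
  | cons x rest ih =>
    intro h
    by_cases hx : pvIsH x
    · simp only [pvM, hx, if_true, List.takeWhile_cons_of_pos, List.dropWhile_cons_of_pos,
        List.map_cons, ih (pvItem x), pvCloseLast, List.cons_append]
    · simp [pvM, hx, List.takeWhile_cons_of_neg, List.dropWhile_cons_of_neg, pvCloseLast, pvG]

-- B's pass computes pvG (false state) / pvM (open-run state), output kept reversed
theorem pbLoop_spec (xs : List (List Char)) :
    (∀ acc, (pbLoop xs false acc).reverse = acc.reverse ++ pvG xs) ∧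
    (∀ h t, (pbLoop xs true (h :: t)).reverse = t.reverse ++ pvM h xs) := by
  induction xs with
  | nil =>
    constructor
    · intro acc; simp [pbLoop, pvG]
    · intro h t; simp [pbLoop, pbClose, pvM]
  | cons x rest ih =>
    constructor
    · intro acc
      by_cases hx : PySem.Chars.startswith x ['#'] = true
      · rw [show pbLoop (x :: rest) false acc = pbLoop rest true (pvFirst x :: acc) from by
          simp [pbLoop, hx]]
        rw [ih.2]
        simp [pvG, pvIsH, hx]
      · rw [show pbLoop (x :: rest) false acc = pbLoop rest false (x :: acc) from by
          simp [pbLoop, hx]]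
        rw [ih.1]
        simp [pvG, pvIsH, hx]
    · intro h t
      by_cases hx : PySem.Chars.startswith x ['#'] = true
      · rw [show pbLoop (x :: rest) true (h :: t) = pbLoop rest true (pvItem x :: h :: t) from by
          simp [pbLoop, hx]]
        rw [ih.2]
        simp [pvM, pvIsH, hx]
      · rw [show pbLoop (x :: rest) true (h :: t)
            = pbLoop rest false (x :: (h ++ pvEndStr) :: t) from by
          simp [pbLoop, pbClose, hx]]
        rw [ih.1]
        simp [pvM, pvIsH, hx]

-- A's while loop rewrites exactly the maximal '#'-run after the first item
theorem paWhile_spec (xs : List (List Char)) :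
    ∀ P, paWhile (P ++ xs) P.length =
      (P ++ ((xs.takeWhile pvIsH).map pvItem ++ xs.dropWhile pvIsH),
       P.length + (xs.takeWhile pvIsH).length) := by
  induction xs with
  | nil =>
    intro P
    rw [paWhile]
    simp
  | cons x rest ih =>
    intro P
    have hget : (P ++ x :: rest).getD P.length [] = x := by simp [List.getD]
    by_cases hx : pvIsH x
    · rw [paWhile]
      have hset : (P ++ x :: rest).set P.length (pvItem ((P ++ x :: rest).getD P.length []))
          = (P ++ [pvItem x]) ++ rest := by simp
      rw [dif_pos ⟨by simp, by rw [hget]; exact hx⟩, hset]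
      have hl : P.length + 1 = (P ++ [pvItem x]).length := by simp
      rw [hl, ih (P ++ [pvItem x])]
      simp [List.takeWhile_cons_of_pos hx, List.dropWhile_cons_of_pos hx]
      omega
    · have hx' : pvIsH x = false := by simpa using hx
      rw [paWhile]
      rw [dif_neg (by rw [hget]; simp [pvIsH] at hx'; simp [hx'])]
      simp [hx']

-- unfolding lemmas for A's for loop (one step of the loop body)
theorem paFor_step_true (L : List (List Char)) (i n : Nat) (h1 : i < n)
    (h2 : PySem.Chars.startswith (L.getD i []) ['#'] = true) :
    paFor L i n = paFor
      ((paWhile (L.set i (pvFirst (L.getD i []))) (i + 1)).1.set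
        ((paWhile (L.set i (pvFirst (L.getD i []))) (i + 1)).2 - 1)
        ((paWhile (L.set i (pvFirst (L.getD i []))) (i + 1)).1.getD
          ((paWhile (L.set i (pvFirst (L.getD i []))) (i + 1)).2 - 1) [] ++ pvEndStr))
      (i + 1) n := by
  rw [paFor]
  simp only [dif_pos h1, h2, if_true]

theorem paFor_step_false (L : List (List Char)) (i n : Nat) (h1 : i < n)
    (h2 : PySem.Chars.startswith (L.getD i []) ['#'] = false) :
    paFor L i n = paFor L (i + 1) n := by
  rw [paFor]
  simp only [dif_pos h1, h2, Bool.false_eq_true, if_false]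

theorem paFor_stop (L : List (List Char)) (i n : Nat) (h : ¬ i < n) : paFor L i n = L := by
  rw [paFor, dif_neg h]

-- splitting a line list at takeWhile/dropWhile preserves length
theorem pvTakeDrop_length (l : List (List Char)) :
    (l.takeWhile pvIsH).length + (l.dropWhile pvIsH).length = l.length := by
  rw [← List.length_append, List.takeWhile_append_dropWhile]

-- getD into the middle block of a three-part append
theorem pvGetD_middle (P C Q : List (List Char)) (j : Nat) (h1 : P.length ≤ j)
    (h2 : j < P.length + C.length) :
    ((P ++ C) ++ Q).getD j [] = C.getD (j - P.length) [] := by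
  rw [List.append_assoc, List.getD, List.getElem?_append_right h1,
    List.getElem?_append_left (by omega)]
  rfl

-- A's for loop skips already-rewritten (non-'#') lines
theorem paFor_skip (k : Nat) : ∀ (L : List (List Char)) (i n : Nat),
    (∀ j, i ≤ j → j < i + k → pvIsH (L.getD j []) = false) →
    i + k ≤ n → paFor L i n = paFor L (i + k) n := by
  induction k with
  | zero => intro L i n _ _; rfl
  | succ k ih =>
    intro L i n hj hk
    rw [paFor_step_false L i n (by omega) (by simpa [pvIsH] using hj i le_rfl (by omega))]
    rw [ih L (i + 1) n (fun j hj1 hj2 => hj j (by omega) (by omega)) (by omega)]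
    congr 1
    omega

-- A's for loop computes pvG on the untouched suffix
theorem paFor_spec (m : Nat) : ∀ (xs P : List (List Char)), xs.length = m →
    paFor (P ++ xs) P.length (P.length + xs.length) = P ++ pvG xs := by
  induction m using Nat.strong_induction_on with
  | _ m ih =>
    intro xs P hm
    cases xs with
    | nil => simp [paFor_stop, pvG]
    | cons x rest =>
      have hget : (P ++ x :: rest).getD P.length [] = x := by simp [List.getD]
      by_cases hx : pvIsH x
      · -- the '#' case: a run is rewritten, closed by the look-back, then skipped over
        have hx' : PySem.Chars.startswith x ['#'] = true := hx
        set run := rest.takeWhile pvIsH with hrun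
        set rest' := rest.dropWhile pvIsH with hrest'
        have hrl : run.length + rest'.length = rest.length := pvTakeDrop_length rest
        set C := pvCloseLast (pvFirst x :: run.map pvItem) with hC
        have hCl : C.length = run.length + 1 := by
          rw [hC, pvCloseLast_length]; simp
        rw [paFor_step_true (P ++ x :: rest) P.length (P.length + (x :: rest).length)
          (by simp) (by rw [hget]; exact hx')]
        rw [hget]
        rw [show (P ++ x :: rest).set P.length (pvFirst x) = (P ++ [pvFirst x]) ++ rest from by
          simp]
        have hw : paWhile ((P ++ [pvFirst x]) ++ rest) (P.length + 1)
            = (P ++ (pvFirst x :: (run.map pvItem ++ rest')), P.length + 1 + run.length) := by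
          have h0 := paWhile_spec rest (P ++ [pvFirst x])
          simp only [List.length_append, List.length_cons, List.length_nil] at h0
          rw [show P.length + 1 = P.length + (0 + 1) from by omega]
          rw [h0]
          simp [← hrun, ← hrest']
        rw [hw]
        simp only
        have hset : (P ++ (pvFirst x :: (run.map pvItem ++ rest'))).set
              (P.length + 1 + run.length - 1)
              ((P ++ (pvFirst x :: (run.map pvItem ++ rest'))).getD
                (P.length + 1 + run.length - 1) [] ++ pvEndStr)
            = (P ++ C) ++ rest' := by
          have hys : P ++ (pvFirst x :: (run.map pvItem ++ rest'))
              = (P ++ (pvFirst x :: run.map pvItem)) ++ rest' := by simp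
          have hidx : P.length + 1 + run.length - 1
              = (P ++ (pvFirst x :: run.map pvItem)).length - 1 := by simp
          rw [hys, hidx, pvSetLast (P ++ (pvFirst x :: run.map pvItem)) rest' (by simp),
            pvCloseLast_append P _ (by simp), ← hC]
        rw [hset]
        -- all lines of the rewritten block are non-'#'
        have hCheads : ∀ y ∈ C, pvIsH y = false := by
          apply pvCloseLast_heads
          intro y hy
          rcases List.mem_cons.mp hy with hy | hy
          · rw [hy]; exact pvFirst_head x
          · obtain ⟨l, _, hl⟩ := List.mem_map.mp hy
            rw [← hl]; exact pvItem_head l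
        have hskip := paFor_skip run.length ((P ++ C) ++ rest') (P.length + 1)
          (P.length + (x :: rest).length)
          (by
            intro j hj1 hj2
            rw [pvGetD_middle P C rest' j (by omega) (by omega)]
            exact hCheads _ (by
              have hlt : j - P.length < C.length := by omega
              rw [List.getD_eq_getElem C [] hlt]
              exact List.getElem_mem hlt))
          (by simp; omega)
        rw [hskip]
        have hrec := ih rest'.length (by simp at hm; omega) rest' (P ++ C) rfl
        have hi : P.length + 1 + run.length = (P ++ C).length := by simp [hCl]; omega
        have hn : P.length + (x :: rest).length = (P ++ C).length + rest'.length := by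
          simp [hCl]; omega
        rw [List.append_assoc] at hrec ⊢
        rw [hi, hn, hrec]
        rw [show pvG (x :: rest) = pvM (pvFirst x) rest from by simp [pvG, hx]]
        rw [pvM_run rest (pvFirst x), ← hrun, ← hrest', ← hC]
        simp
      · -- plain line: copied unchanged
        rw [paFor_step_false (P ++ x :: rest) P.length (P.length + (x :: rest).length)
          (by simp) (by rw [hget]; simpa [pvIsH] using hx)]
        have hxs : P ++ x :: rest = (P ++ [x]) ++ rest := by simp
        have hw : P.length + 1 = (P ++ [x]).length := by simp
        have hn : P.length + (x :: rest).length = (P ++ [x]).length + rest.length := by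
          simp; omega
        rw [hxs, hw, hn, ih rest.length (by simp at hm; omega) rest (P ++ [x]) rfl]
        simp only [List.append_assoc, List.cons_append, List.nil_append]
        rw [show pvG (x :: rest) = x :: pvG rest from by simp [pvG, hx]]

-- ===== VERDICT (by name: the statement is the Claim_ definition above) =====
theorem convertEnumerate_spec : Claim_equal_convertEnumerate := by
  intro text _dom
  unfold Spec_convertEnumerate convertEnumerate convertEnumerate_alt
  have hA := paFor_spec (PySem.Chars.splitOn text.toList ['\n']).length
      (PySem.Chars.splitOn text.toList ['\n']) [] rfl
  have hB := (pbLoop_spec (PySem.Chars.splitOn text.toList ['\n'])).1 []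
  simp only [List.nil_append, List.length_nil, Nat.zero_add, List.reverse_nil] at hA hB
  rw [hA, hB]
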